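-- pv_equiv track=rewrite | github.com/Deco71/UniProjects | Fondamenti di programmazione/Homework 2/program01.py | normalizzatore
-- ===== SOURCE A (Python) =====
-- def normalizzatore(lista):
--     normalista = {}
--     risultato = []
--     contatore = 0
--     for elemento in lista:
--         if elemento not in normalista:
--             normalista[elemento] = contatore
--             contatore += 1
--         risultato.append(normalista[elemento])
--     return risultato
-- ===== SOURCE B (Python) =====
-- def normalizzatore(lista):
--     return [len(set(lista[:lista.index(e)])) for e in lista]
-- ===== Notes on version B (the rewrite author's own statement) =====
-- stated objective: alternative
-- what changed: B uses no dict and no running counter at all: each element's label is computed independently as the number of distinct values in the prefix before that element's first occurrence, len(set(lista[:lista.index(e)])); A instead grows a label dict in a single stateful pass.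
import Mathlib
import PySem

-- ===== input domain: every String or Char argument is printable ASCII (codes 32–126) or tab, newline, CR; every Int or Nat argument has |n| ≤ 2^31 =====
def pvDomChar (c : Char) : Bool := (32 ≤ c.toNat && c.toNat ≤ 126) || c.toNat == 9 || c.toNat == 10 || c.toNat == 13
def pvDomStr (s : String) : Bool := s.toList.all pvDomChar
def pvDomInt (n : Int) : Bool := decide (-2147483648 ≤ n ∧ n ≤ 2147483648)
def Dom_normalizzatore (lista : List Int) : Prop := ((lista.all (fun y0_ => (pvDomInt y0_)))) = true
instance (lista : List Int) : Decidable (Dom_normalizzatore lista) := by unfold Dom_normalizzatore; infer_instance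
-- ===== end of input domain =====

-- B drops A's dict and counter entirely: each label is computed independently as the
-- number of distinct values in the prefix before that element's first occurrence
-- (len(set(lista[:lista.index(e)]))); a genuinely different, dict-free algorithm
-- (O(n^2) instead of A's O(n)).

-- ===== PORT A =====
-- the 'for elemento in lista' loop, with state (normalista, risultato, contatore)
def normalizzatore_loop : List Int → PySem.Dict Int Int → List Int → Int → List Int
  | [], _, risultato, _ => risultato
  | elemento :: rest, normalista, risultato, contatore =>
      if normalista.contains elemento = false then
        -- normalista[elemento] = contatore; contatore += 1; then append normalista[elemento]
        normalizzatore_loop rest (normalista.insert elemento contatore)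
          (risultato ++ [(normalista.insert elemento contatore).getD elemento 0]) (contatore + 1)
      else
        normalizzatore_loop rest normalista
          (risultato ++ [normalista.getD elemento 0]) contatore

def normalizzatore (lista : List Int) : List Int :=
  normalizzatore_loop lista PySem.Dict.empty [] 0

-- ===== PORT B =====
-- [len(set(lista[:lista.index(e)])) for e in lista]
-- (lista.index(e) never raises here since e is drawn from lista; getD 0 is unreachable)
def normalizzatore_alt (lista : List Int) : List Int :=
  lista.map (fun e =>
    ((PySem.Set.ofList
        (PySem.List.slice lista none
          (some (((PySem.List.index? lista e).getD 0 : Nat) : Int)))).length : Int))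

-- ===== PRECONDITION & SPEC =====
def Spec_normalizzatore (lista : List Int) (out : List Int) : Prop := out = normalizzatore_alt lista
instance (lista : List Int) (out : List Int) : Decidable (Spec_normalizzatore lista out) := by unfold Spec_normalizzatore; infer_instance

-- ===== CLAIM (what is proved, stated in full; the proofs are below) =====
def Claim_equal_normalizzatore : Prop := ∀ (lista : List Int), Dom_normalizzatore lista → Spec_normalizzatore lista (normalizzatore lista)

-- ===== LEMMAS AND PROOFS =====

-- first-occurrence index is stable under appending
lemma idxOf_append_left {u w : List Int} {e : Int} (he : e ∈ u) :
    (u ++ w).idxOf e = u.idxOf e := by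
  induction u with
  | nil => cases he
  | cons x t ih =>
      by_cases hx : x = e
      · subst hx; simp [List.idxOf_cons_self]
      · rcases List.mem_cons.mp he with h | h
        · exact absurd h.symm hx
        · simp [List.idxOf_cons_ne _ hx, ih h]

lemma idxOf_update_of_mem {u : List Int} (t : List Int) {e : Int} (he : e ∈ u) :
    (PySem.Set.update u t).idxOf e = u.idxOf e := by
  rw [PySem.Set.update_eq_append_filter, idxOf_append_left he]

lemma idxOf_append_singleton_self {u : List Int} {e : Int} (he : e ∉ u) :
    (u ++ [e]).idxOf e = u.length := by
  induction u with
  | nil => simp [List.idxOf_cons_self]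
  | cons x t ih =>
      simp only [List.mem_cons, not_or] at he
      simp [List.idxOf_cons_ne _ (fun h => he.1 h.symm), ih he.2]

-- loop invariant for A: the dict carries exactly the first-occurrence indices of u
lemma loopA_eq (rest : List Int) (u : List Int) (d : PySem.Dict Int Int) (res : List Int)
    (hu : u.Nodup)
    (hc : ∀ x, d.contains x = decide (x ∈ u))
    (hg : ∀ x ∈ u, d.getD x 0 = (u.idxOf x : Int)) :
    normalizzatore_loop rest d res (u.length : Int)
      = res ++ rest.map (fun e => ((PySem.Set.update u rest).idxOf e : Int)) := by
  induction rest generalizing u d res with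
  | nil => simp [normalizzatore_loop]
  | cons e t ih =>
      by_cases hmem : e ∈ u
      · have hcontains : d.contains e = true := by rw [hc]; simp [hmem]
        have hupd : PySem.Set.update u (e :: t) = PySem.Set.update u t := by
          rw [PySem.Set.update_cons, PySem.Set.add_of_mem hmem]
        rw [normalizzatore_loop]
        simp only [hcontains]
        rw [if_neg (by simp)]
        rw [ih u d _ hu hc hg, hupd]
        simp only [List.map_cons, List.append_assoc, List.singleton_append]
        rw [hg e hmem, idxOf_update_of_mem t hmem]
      · have hcontains : d.contains e = false := by rw [hc]; simp [hmem]
        have hu' : (u ++ [e]).Nodup := by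
          have : List.Disjoint u [e] := by
            intro a ha hb
            rw [List.mem_singleton] at hb
            exact hmem (hb ▸ ha)
          exact List.Nodup.append hu (List.nodup_singleton e) this
        have hc' : ∀ x, (d.insert e (u.length : Int)).contains x = decide (x ∈ u ++ [e]) := by
          intro x
          rw [PySem.Dict.contains_insert, hc]
          by_cases hx : x = e <;> simp [hx]
        have hg' : ∀ x ∈ u ++ [e],
            (d.insert e (u.length : Int)).getD x 0 = ((u ++ [e]).idxOf x : Int) := by
          intro x hx
          rw [PySem.Dict.getD_insert]
          by_cases hxe : x = e
          · subst hxe; rw [if_pos rfl, idxOf_append_singleton_self hmem]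
          · rw [if_neg hxe]
            have hxu : x ∈ u := by
              rcases List.mem_append.mp hx with h | h
              · exact h
              · simp at h; exact absurd h hxe
            rw [hg x hxu, idxOf_append_left hxu]
        have hupd : PySem.Set.update u (e :: t) = PySem.Set.update (u ++ [e]) t := by
          rw [PySem.Set.update_cons, PySem.Set.add_of_not_mem hmem]
        have hlen : ((u ++ [e]).length : Int) = (u.length : Int) + 1 := by
          simp
        rw [normalizzatore_loop]
        simp only [hcontains]
        rw [if_pos trivial]
        have := ih (u ++ [e]) (d.insert e (u.length : Int))
          (res ++ [(d.insert e (u.length : Int)).getD e 0]) hu' hc' hg'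
        rw [← hlen, this, hupd]
        simp only [List.map_cons, List.append_assoc, List.singleton_append]
        rw [hg' e (by simp), idxOf_update_of_mem t (by simp)]

theorem normA_eq_map (lista : List Int) :
    normalizzatore lista
      = lista.map (fun e => ((PySem.List.dedup lista).idxOf e : Int)) := by
  have h := loopA_eq lista [] PySem.Dict.empty [] List.nodup_nil
    (fun x => by simp [PySem.Dict.contains_empty])
    (fun x hx => by cases hx)
  simpa [normalizzatore, PySem.Set.update_nil_left, PySem.List.dedup_eq_ofList] using h

-- the distinct count of the prefix before e's first occurrence is e's first-occurrence rank
lemma update_take_idxOf (l : List Int) (u : List Int) (e : Int)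
    (hel : e ∈ l) (heu : e ∉ u) :
    (PySem.Set.update u (l.take (l.idxOf e))).length
      = (PySem.Set.update u l).idxOf e := by
  induction l generalizing u with
  | nil => cases hel
  | cons x t ih =>
      by_cases hx : x = e
      · subst hx
        rw [List.idxOf_cons_self]
        simp only [List.take_zero]
        have h2 : PySem.Set.update u ([] : List Int) = u := rfl
        rw [h2, PySem.Set.update_cons, PySem.Set.add_of_not_mem heu,
            idxOf_update_of_mem t (by simp), idxOf_append_singleton_self heu]
      · have het : e ∈ t := by
          rcases List.mem_cons.mp hel with h | h
          · exact absurd h.symm hx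
          · exact h
        have heu' : e ∉ PySem.Set.add u x := by
          rw [PySem.Set.add]
          split
          · exact heu
          · intro h
            rcases List.mem_append.mp h with h | h
            · exact heu h
            · simp at h; exact hx h.symm
        rw [List.idxOf_cons_ne _ hx, List.take_succ_cons,
            PySem.Set.update_cons, PySem.Set.update_cons]
        exact ih (PySem.Set.add u x) het heu'

lemma index?_getD (l : List Int) (e : Int) (he : e ∈ l) :
    (PySem.List.index? l e).getD 0 = l.idxOf e := by
  induction l with
  | nil => cases he
  | cons x t ih =>
      by_cases hx : x = e
      · subst hx
        rw [PySem.List.index?_cons_self, List.idxOf_cons_self]; rfl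
      · have het : e ∈ t := by
          rcases List.mem_cons.mp he with h | h
          · exact absurd h.symm hx
          · exact h
        rw [PySem.List.index?_cons_of_ne _ hx, List.idxOf_cons_ne _ hx]
        cases hres : PySem.List.index? t e with
        | none =>
            exact absurd ((PySem.List.index?_eq_none_iff t e).mp hres) (by simpa using het)
        | some k =>
            have hk := ih het
            rw [hres] at hk
            simp only [Option.getD_some] at hk
            simp [hk]

theorem normB_eq_map (lista : List Int) :
    normalizzatore_alt lista
      = lista.map (fun e => ((PySem.List.dedup lista).idxOf e : Int)) := by
  unfold normalizzatore_alt
  apply List.map_congr_left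
  intro e he
  rw [index?_getD lista e he, PySem.List.slice_to_natCast]
  have h := update_take_idxOf lista [] e he (by simp)
  simp only [PySem.Set.update_nil_left] at h
  rw [PySem.List.dedup_eq_ofList, h]

-- ===== VERDICT (by name: the statement is the Claim_ definition above) =====
theorem normalizzatore_spec : Claim_equal_normalizzatore := by
  intro lista _
  unfold Spec_normalizzatore
  rw [normA_eq_map, normB_eq_map]
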